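-- pv_equiv track=rewrite | github.com/NobleWolf412/SnipeTrade | src/snipetrade/filters/pair_filter.py | is_stablecoin_pair
-- ===== SOURCE A (Python) =====
-- STABLECOINS = {
--     'USDT', 'USDC', 'BUSD', 'DAI', 'TUSD', 'USDP', 'USDD',
--     'GUSD', 'FRAX', 'LUSD', 'USDK', 'USDJ', 'HUSD', 'CUSD',
--     'UST', 'USTC', 'SUSD', 'DUSD', 'OUSD', 'MUSD', 'RSV'
-- }
--
-- def is_stablecoin_pair(symbol: str) -> bool:
--     """Check if a pair involves stablecoins on both sides
--
--     Args:
--         symbol: Trading pair symbol (e.g., 'USDT/USDC')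
--
--     Returns:
--         True if both base and quote are stablecoins
--     """
--     parts = symbol.replace('/', '').split(':')
--     base_quote = parts[0]
--
--     # Try to split into base and quote
--     for stable in STABLECOINS:
--         if base_quote.endswith(stable):
--             base = base_quote[:-len(stable)]
--             quote = stable
--             return base in STABLECOINS and quote in STABLECOINS
--
--     return False
-- ===== SOURCE B (Python) =====
-- STABLECOINS = {
--     'USDT', 'USDC', 'BUSD', 'DAI', 'TUSD', 'USDP', 'USDD',
--     'GUSD', 'FRAX', 'LUSD', 'USDK', 'USDJ', 'HUSD', 'CUSD',
--     'UST', 'USTC', 'SUSD', 'DUSD', 'OUSD', 'MUSD', 'RSV'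
-- }
--
-- def is_stablecoin_pair(symbol: str) -> bool:
--     """Check if a pair involves stablecoins on both sides (same contract as A).
--
--     Every stablecoin ticker has 3 or 4 characters and none is a proper suffix
--     of another, so only the split positions n-3 and n-4 can possibly work."""
--     base_quote = symbol.replace('/', '').split(':')[0]
--     n = len(base_quote)
--     return any(base_quote[:n - k] in STABLECOINS and base_quote[n - k:] in STABLECOINS
--                for k in (3, 4) if k < n)
-- ===== Notes on version B (the rewrite author's own statement) =====
-- stated objective: alternative
-- what changed: Instead of scanning the whole stablecoin set for an endswith match and then testing the remaining prefix, B directly tests the only two split positions that can work (every ticker has 3 or 4 characters), checking that both halves are stablecoins; equivalent because no ticker is a proper suffix of another.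
import Mathlib
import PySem

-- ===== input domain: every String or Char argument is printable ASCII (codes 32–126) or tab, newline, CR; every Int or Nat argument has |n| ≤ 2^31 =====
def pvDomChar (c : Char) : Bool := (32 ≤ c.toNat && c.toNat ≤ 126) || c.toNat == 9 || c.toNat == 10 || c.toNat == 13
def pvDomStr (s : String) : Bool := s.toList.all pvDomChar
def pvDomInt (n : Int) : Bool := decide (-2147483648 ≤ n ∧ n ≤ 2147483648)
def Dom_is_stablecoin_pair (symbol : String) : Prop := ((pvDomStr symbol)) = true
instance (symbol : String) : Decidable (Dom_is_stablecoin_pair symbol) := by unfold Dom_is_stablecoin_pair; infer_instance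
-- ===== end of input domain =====

-- B replaces A's scan over the stablecoin set (endswith + membership test on the remaining prefix)
-- by testing the only two split positions that can work (all tickers have 3 or 4 characters);
-- objective: alternative decomposition, equivalent because no ticker is a proper suffix of another.

-- the module constant STABLECOINS (a Python set of distinct strings; membership only, so order is immaterial)
def pvStables : List (List Char) :=
  ["USDT".toList, "USDC".toList, "BUSD".toList, "DAI".toList, "TUSD".toList,
   "USDP".toList, "USDD".toList, "GUSD".toList, "FRAX".toList, "LUSD".toList,
   "USDK".toList, "USDJ".toList, "HUSD".toList, "CUSD".toList, "UST".toList,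
   "USTC".toList, "SUSD".toList, "DUSD".toList, "OUSD".toList, "MUSD".toList,
   "RSV".toList]

-- ===== PORT A =====
-- the 'for stable in STABLECOINS' loop: first suffix match decides the answer
def pvALoop (bq : List Char) : List (List Char) → Bool
  | [] => false
  | s :: rest =>
    if PySem.Chars.endswith bq s then
      -- base = base_quote[:-len(stable)];  'base in STABLECOINS and quote in STABLECOINS'
      decide (PySem.Chars.slice bq none (some (-((s.length : Int)))) ∈ pvStables) &&
      decide (s ∈ pvStables)
    else pvALoop bq rest

def is_stablecoin_pair (symbol : String) : Bool :=
  -- parts = symbol.replace('/', '').split(':'); base_quote = parts[0]  (split always returns ≥ 1 piece)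
  let parts := PySem.Chars.splitOn (PySem.Chars.replace symbol.toList ['/'] []) [':']
  let base_quote := match parts with | q :: _ => q | [] => []
  pvALoop base_quote pvStables

-- ===== PORT B =====
def is_stablecoin_pair_alt (symbol : String) : Bool :=
  let parts := PySem.Chars.splitOn (PySem.Chars.replace symbol.toList ['/'] []) [':']
  let base_quote := match parts with | q :: _ => q | [] => []
  let n : Int := PySem.Chars.len base_quote
  -- any(base_quote[:n-k] in STABLECOINS and base_quote[n-k:] in STABLECOINS for k in (3, 4) if k < n)
  (([3, 4] : List Int).filter (fun k => k < n)).any (fun k =>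
    decide (PySem.Chars.slice base_quote none (some (n - k)) ∈ pvStables) &&
    decide (PySem.Chars.slice base_quote (some (n - k)) none ∈ pvStables))

-- ===== PRECONDITION & SPEC =====
def Spec_is_stablecoin_pair (symbol : String) (out : Bool) : Prop := out = is_stablecoin_pair_alt symbol
instance (symbol : String) (out : Bool) : Decidable (Spec_is_stablecoin_pair symbol out) := by unfold Spec_is_stablecoin_pair; infer_instance

-- ===== CLAIM (what is proved, stated in full; the proofs are below) =====
def Claim_equal_is_stablecoin_pair : Prop := ∀ (symbol : String), Dom_is_stablecoin_pair symbol → Spec_is_stablecoin_pair symbol (is_stablecoin_pair symbol)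

-- ===== LEMMAS AND PROOFS =====

-- every stablecoin name has exactly 3 or 4 characters
lemma pvStables_len : ∀ s ∈ pvStables, s.length = 3 ∨ s.length = 4 := by decide

-- no stablecoin name is a proper suffix of another (the fact that makes the matching split unique)
lemma pvStables_suffix : ∀ s ∈ pvStables, ∀ t ∈ pvStables, s <:+ t → s = t := by decide

-- characterisation of A's loop over any sublist of the stablecoin set
lemma pvALoop_true_iff (bq : List Char) (M : List (List Char)) (hM : ∀ s ∈ M, s ∈ pvStables) :
    pvALoop bq M = true ↔
      ∃ s ∈ M, s <:+ bq ∧ bq.take (bq.length - s.length) ∈ pvStables := by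
  induction M with
  | nil => simp [pvALoop]
  | cons s rest ih =>
    have hs : s ∈ pvStables := hM s (by simp)
    have hrest : ∀ t ∈ rest, t ∈ pvStables := fun t ht => hM t (by simp [ht])
    by_cases hend : s <:+ bq
    · have hpos : 0 < s.length := by rcases pvStables_len s hs with h | h <;> omega
      have hsl : PySem.Chars.slice bq none (some (-((s.length : Int)))) =
          bq.take (bq.length - s.length) := by
        simp [PySem.List.slice_to_neg_natCast bq s.length hpos]
      rw [pvALoop]
      rw [if_pos (by simpa [PySem.Chars.endswith_iff] using hend)]
      simp only [hsl, Bool.and_eq_true, decide_eq_true_eq]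
      constructor
      · rintro ⟨h1, _⟩
        exact ⟨s, by simp, hend, h1⟩
      · rintro ⟨t, htm, htsuf, htake⟩
        have hts : t = s := by
          rcases List.mem_cons.mp htm with h | h
          · exact h
          · have htL : t ∈ pvStables := hrest t h
            rcases List.suffix_or_suffix_of_suffix htsuf hend with hc | hc
            · exact pvStables_suffix t htL s hs hc
            · exact (pvStables_suffix s hs t htL hc).symm
        subst hts
        exact ⟨htake, hs⟩
    · rw [pvALoop]
      rw [if_neg (by simpa [PySem.Chars.endswith_iff] using hend)]
      rw [ih hrest]
      constructor
      · rintro ⟨t, htm, h⟩; exact ⟨t, by simp [htm], h⟩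
      · rintro ⟨t, htm, htsuf, htake⟩
        rcases List.mem_cons.mp htm with h | h
        · exact absurd (h ▸ htsuf) hend
        · exact ⟨t, h, htsuf, htake⟩

-- characterisation of B's loop over the two candidate suffix lengths
lemma pvBAny_true_iff (bq : List Char) :
    ((([3, 4] : List Int).filter (fun k => k < (PySem.Chars.len bq : Int))).any (fun k =>
      decide (PySem.Chars.slice bq none (some ((PySem.Chars.len bq : Int) - k)) ∈ pvStables) &&
      decide (PySem.Chars.slice bq (some ((PySem.Chars.len bq : Int) - k)) none ∈ pvStables)) = true) ↔
    ∃ k : Nat, (k = 3 ∨ k = 4) ∧ k < bq.length ∧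
      bq.take (bq.length - k) ∈ pvStables ∧ bq.drop (bq.length - k) ∈ pvStables := by
  rw [List.any_eq_true]
  have hlen : (PySem.Chars.len bq : Int) = (bq.length : Int) := by simp
  constructor
  · rintro ⟨i, hmem, hpred⟩
    rw [List.mem_filter] at hmem
    obtain ⟨hi2, hilt⟩ := hmem
    have hi34 : i = 3 ∨ i = 4 := by simpa using hi2
    have hlt : i < (bq.length : Int) := by
      have := of_decide_eq_true hilt; omega
    have h0 : (0 : Int) ≤ (PySem.Chars.len bq : Int) - i := by omega
    have harg : ((PySem.Chars.len bq : Int) - i).toNat = bq.length - i.toNat := by omega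
    simp only [Bool.and_eq_true, decide_eq_true_eq, PySem.Chars.slice_eq_listSlice,
      PySem.List.slice_to (xs := bq) h0, PySem.List.slice_from (xs := bq) h0, harg] at hpred
    exact ⟨i.toNat, by omega, by omega, hpred.1, hpred.2⟩
  · rintro ⟨k, hk34, hklt, htake, hdrop⟩
    have h0 : (0 : Int) ≤ (PySem.Chars.len bq : Int) - (k : Int) := by omega
    have harg : ((PySem.Chars.len bq : Int) - (k : Int)).toNat = bq.length - k := by omega
    refine ⟨(k : Int), List.mem_filter.mpr ⟨by rcases hk34 with h | h <;> simp [h],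
      decide_eq_true (by omega)⟩, ?_⟩
    simp only [Bool.and_eq_true, decide_eq_true_eq, PySem.Chars.slice_eq_listSlice,
      PySem.List.slice_to (xs := bq) h0, PySem.List.slice_from (xs := bq) h0, harg]
    exact ⟨htake, hdrop⟩

-- the core equivalence, on the preprocessed base_quote
lemma pvCore (bq : List Char) :
    pvALoop bq pvStables =
    ((([3, 4] : List Int).filter (fun k => k < (PySem.Chars.len bq : Int))).any (fun k =>
      decide (PySem.Chars.slice bq none (some ((PySem.Chars.len bq : Int) - k)) ∈ pvStables) &&
      decide (PySem.Chars.slice bq (some ((PySem.Chars.len bq : Int) - k)) none ∈ pvStables))) := by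
  rw [Bool.eq_iff_iff, pvALoop_true_iff bq pvStables (fun s hs => hs), pvBAny_true_iff]
  constructor
  · rintro ⟨s, hsL, hsuf, htake⟩
    have hslen := pvStables_len s hsL
    have hle : s.length ≤ bq.length := hsuf.length_le
    have htklen := pvStables_len _ htake
    have htl : (bq.take (bq.length - s.length)).length = bq.length - s.length := by
      simp [List.length_take]
    refine ⟨s.length, hslen, by omega, htake, ?_⟩
    have := List.suffix_iff_eq_drop.mp hsuf
    rw [← this]; exact hsL
  · rintro ⟨k, hk34, hklt, htake, hdrop⟩
    refine ⟨bq.drop (bq.length - k), hdrop, List.drop_suffix _ bq, ?_⟩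
    have : bq.length - (bq.drop (bq.length - k)).length = bq.length - k := by
      simp [List.length_drop]; omega
    rw [this]; exact htake

-- ===== VERDICT (by name: the statement is the Claim_ definition above) =====
theorem is_stablecoin_pair_spec : Claim_equal_is_stablecoin_pair := by
  intro symbol _
  unfold Spec_is_stablecoin_pair is_stablecoin_pair is_stablecoin_pair_alt
  exact pvCore _
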